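-- pv_equiv track=rewrite | github.com/GODZAOZAO/aws-lambdas-master | handle-calorie/calorieninja.py | get_manual_calorie_info
-- ===== SOURCE A (Python) =====
-- def get_manual_calorie_info(querystring):
--     nutrition = {}
--     for key in querystring:
--         if (
--             key == "name" or key == "calories" or key == "sodium_mg" or key == "sugar_g" or
--             key == "fat_total_g" or key == "cholesterol_mg" or key == "protein_g" or
--             key == "fiber_g" or key == "serving_size_g" or key == "fat_saturated_g" or
--             key == "carbohydrates_total_g" or key == "potassium_mg"
--         ):
--             nutrition[key] = querystring[key]
--
--         else:
--             return False
--
--     # We will require name and calorie for food items.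
--     if "name" not in nutrition or "calories" not in nutrition:
--         return False
--
--     return {"items": [nutrition]}
-- ===== SOURCE B (Python) =====
-- OTHER_ALLOWED = ("sodium_mg", "sugar_g", "fat_total_g", "cholesterol_mg",
--                  "protein_g", "fiber_g", "serving_size_g", "fat_saturated_g",
--                  "carbohydrates_total_g", "potassium_mg")
--
-- def get_manual_calorie_info(querystring):
--     # Single recursive pass over the keys as a 2-flag state machine: no
--     # intermediate nutrition dict, the required-key check is fused into the scan.
--     def scan(keys, has_name, has_calories):
--         if not keys:
--             if has_name and has_calories:
--                 return {"items": [dict(querystring)]}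
--             return False
--         k = keys[0]
--         if k == "name":
--             return scan(keys[1:], True, has_calories)
--         if k == "calories":
--             return scan(keys[1:], has_name, True)
--         if k in OTHER_ALLOWED:
--             return scan(keys[1:], has_name, has_calories)
--         return False
--     return scan(list(querystring), False, False)
-- ===== Notes on version B (the rewrite author's own statement) =====
-- stated objective: alternative
-- what changed: A's two-phase shape (accumulate a nutrition dict while validating each key, then test membership of 'name'/'calories' in the accumulated dict) is replaced by a single recursive scan that is a state machine over two boolean flags: no intermediate dict is built, required-key tracking is fused into the pass, and the success dict is one bulk copy at the end.
import Mathlib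
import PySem

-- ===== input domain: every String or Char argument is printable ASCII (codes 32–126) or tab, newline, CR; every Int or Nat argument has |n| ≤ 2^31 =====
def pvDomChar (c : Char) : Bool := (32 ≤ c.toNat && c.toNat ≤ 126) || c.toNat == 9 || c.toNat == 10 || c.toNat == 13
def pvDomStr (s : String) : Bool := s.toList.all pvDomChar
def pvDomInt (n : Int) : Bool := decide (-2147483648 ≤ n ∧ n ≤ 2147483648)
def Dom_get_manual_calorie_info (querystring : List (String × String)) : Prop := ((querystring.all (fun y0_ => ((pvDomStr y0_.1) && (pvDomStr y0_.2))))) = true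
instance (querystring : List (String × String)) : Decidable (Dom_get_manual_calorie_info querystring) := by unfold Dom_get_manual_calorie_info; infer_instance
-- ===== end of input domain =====

-- B fuses A's two phases (validate-and-accumulate dict, then membership check) into one
-- recursive scan carrying two boolean flags, with no intermediate dict (objective: alternative).
-- Python A returns False or a dict; per the fixed Bool signature the success dict is ported
-- as true (B's Python returns the identical dict there); the claim is about that Bool.

-- ===== PORT A =====
-- the loop 'for key in querystring', accumulating nutrition, with early 'return False'
def pyAGo (qs : List (String × String)) :
    List (String × String) → PySem.Dict String String → Bool
  | [], nutrition =>
      -- if "name" not in nutrition or "calories" not in nutrition: return False; return {...} (true)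
      if !(nutrition.contains "name") || !(nutrition.contains "calories") then false else true
  | (key, v) :: rest, nutrition =>
      if key == "name" || key == "calories" || key == "sodium_mg" || key == "sugar_g" ||
         key == "fat_total_g" || key == "cholesterol_mg" || key == "protein_g" ||
         key == "fiber_g" || key == "serving_size_g" || key == "fat_saturated_g" ||
         key == "carbohydrates_total_g" || key == "potassium_mg" then
        -- nutrition[key] = querystring[key]  (first-match lookup; key is present, default never used)
        pyAGo qs rest (nutrition.insert key (((PySem.Dict.mk qs).get? key).getD v))
      else false

def get_manual_calorie_info (querystring : List (String × String)) : Bool :=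
  pyAGo querystring querystring PySem.Dict.empty

-- ===== PORT B =====
def pvOtherAllowed : List String :=
  ["sodium_mg", "sugar_g", "fat_total_g", "cholesterol_mg", "protein_g", "fiber_g",
   "serving_size_g", "fat_saturated_g", "carbohydrates_total_g", "potassium_mg"]

-- Source B's 'scan': a state machine over the keys with two boolean flags, no dict
def pyBScan : List String → Bool → Bool → Bool
  | [], hasName, hasCalories => hasName && hasCalories
  | k :: rest, hasName, hasCalories =>
      if k == "name" then pyBScan rest true hasCalories
      else if k == "calories" then pyBScan rest hasName true
      else if pvOtherAllowed.contains k then pyBScan rest hasName hasCalories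
      else false

def get_manual_calorie_info_alt (querystring : List (String × String)) : Bool :=
  pyBScan (querystring.map Prod.fst) false false

-- ===== PRECONDITION & SPEC =====
def Spec_get_manual_calorie_info (querystring : List (String × String)) (out : Bool) : Prop := out = get_manual_calorie_info_alt querystring
instance (querystring : List (String × String)) (out : Bool) : Decidable (Spec_get_manual_calorie_info querystring out) := by unfold Spec_get_manual_calorie_info; infer_instance

-- ===== CLAIM (what is proved, stated in full; the proofs are below) =====
def Claim_equal_get_manual_calorie_info : Prop := ∀ (querystring : List (String × String)), Dom_get_manual_calorie_info querystring → Spec_get_manual_calorie_info querystring (get_manual_calorie_info querystring)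

-- ===== LEMMAS AND PROOFS =====

def pvAllowedB (k : String) : Bool :=
  k == "name" || k == "calories" || k == "sodium_mg" || k == "sugar_g" ||
  k == "fat_total_g" || k == "cholesterol_mg" || k == "protein_g" ||
  k == "fiber_g" || k == "serving_size_g" || k == "fat_saturated_g" ||
  k == "carbohydrates_total_g" || k == "potassium_mg"

-- characterisation of A's loop, by induction on the remaining pairs
theorem pyAGo_eq (qs : List (String × String)) :
    ∀ (l : List (String × String)) (d : PySem.Dict String String),
    pyAGo qs l d =
      (l.all (fun p => pvAllowedB p.1) &&
       (d.contains "name" || (l.map Prod.fst).contains "name") &&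
       (d.contains "calories" || (l.map Prod.fst).contains "calories")) := by
  intro l
  induction l with
  | nil =>
      intro d
      cases hn : d.contains "name" <;> cases hc : d.contains "calories" <;>
        simp [pyAGo, hn, hc]
  | cons p rest ih =>
      intro d
      obtain ⟨key, v⟩ := p
      by_cases h : pvAllowedB key = true
      · have : pyAGo qs ((key, v) :: rest) d =
            pyAGo qs rest (d.insert key (((PySem.Dict.mk qs).get? key).getD v)) := by
          simp only [pyAGo, pvAllowedB] at h ⊢
          rw [if_pos h]
        rw [this, ih]
        simp [h, PySem.Dict.contains_insert]
        cases hk1 : (key == "name") <;> cases hk2 : (key == "calories") <;>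
          cases d.contains "name" <;> cases d.contains "calories" <;> simp_all
      · have : pyAGo qs ((key, v) :: rest) d = false := by
          simp only [pyAGo, pvAllowedB] at h ⊢
          rw [if_neg h]
        rw [this]
        simp [h]

-- characterisation of B's scan, by induction on the remaining keys
theorem pyBScan_eq :
    ∀ (ks : List String) (hn hc : Bool),
    pyBScan ks hn hc =
      (ks.all pvAllowedB && (hn || ks.contains "name") && (hc || ks.contains "calories")) := by
  intro ks
  induction ks with
  | nil =>
      intro hn hc
      cases hn <;> cases hc <;> simp [pyBScan]
  | cons k rest ih =>
      intro hn hc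
      by_cases h1 : k = "name"
      · subst h1
        have step : pyBScan ("name" :: rest) hn hc = pyBScan rest true hc := by
          simp only [pyBScan]; rw [if_pos (by simp)]
        rw [step, ih]
        simp [pvAllowedB]
      · by_cases h2 : k = "calories"
        · subst h2
          have step : pyBScan ("calories" :: rest) hn hc = pyBScan rest hn true := by
            simp only [pyBScan]; rw [if_neg (by simp), if_pos (by simp)]
          rw [step, ih]
          simp [pvAllowedB]
        · by_cases h3 : k ∈ pvOtherAllowed
          · have step : pyBScan (k :: rest) hn hc = pyBScan rest hn hc := by
              simp only [pyBScan]
              rw [if_neg (by simp [h1]), if_neg (by simp [h2]), if_pos (by simpa using h3)]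
            have hall : pvAllowedB k = true := by
              simp [pvOtherAllowed] at h3
              simp [pvAllowedB]
              rcases h3 with h|h|h|h|h|h|h|h|h|h <;> simp [h]
            rw [step, ih]
            simp [hall, h1, h2, eq_comm]
          · have hall : pvAllowedB k = false := by
              simp [pvOtherAllowed] at h3
              simp [pvAllowedB, h1, h2]
              tauto
            have step : pyBScan (k :: rest) hn hc = false := by
              simp only [pyBScan]
              rw [if_neg (by simp [h1]), if_neg (by simp [h2]), if_neg (by simpa using h3)]
            rw [step]
            simp [hall]

-- ===== VERDICT (by name: the statement is the Claim_ definition above) =====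
theorem get_manual_calorie_info_spec : Claim_equal_get_manual_calorie_info := by
  intro qs _
  unfold Spec_get_manual_calorie_info get_manual_calorie_info get_manual_calorie_info_alt
  rw [pyAGo_eq, pyBScan_eq, PySem.Dict.contains_empty, PySem.Dict.contains_empty]
  simp [List.all_map]
  rfl
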